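-- pv_equiv track=rewrite | github.com/devYuMinKim/Coding_Test_with_JavaScript | 20220831/모범답안/20220831_05.js/DuplicateOdd.py | solution
-- ===== SOURCE A (Python) =====
-- def solution(arr):
--     """
--     :param arr: int[]
--     :return: int[]
--     """
--
--     result = []
--
--     i = 0
--     while len(result) < len(arr):
--         element = arr[i]
--         result.append(element)
--         if element % 2 == 1 and len(result) < len(arr):
--             result.append(element)
--
--         i += 1
--
--     return result
-- ===== SOURCE B (Python) =====
-- def solution(arr):
--     n = len(arr)
--     # phase 1: cumulative weight table; odd elements weigh 2, even weigh 1
--     s = []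
--     cum = 0
--     for e in arr:
--         cum += 2 if e % 2 == 1 else 1
--         s.append(cum)
--     # phase 2: for each OUTPUT position j, the source element is the first i
--     # whose cumulative weight exceeds j (found with a galloping pointer)
--     out = []
--     i = 0
--     for j in range(n):
--         while s[i] <= j:
--             i += 1
--         out.append(arr[i])
--     return out
-- ===== Notes on version B (the rewrite author's own statement) =====
-- stated objective: alternative
-- what changed: Replaces A's single while loop that grows the result with appends under two inline len(result) < len(arr) guards by a two-phase algorithm: first build a cumulative-weight table (odd=2, even=1), then loop over output positions 0..n-1, locating each position's source element with a galloping pointer over the table; no result-length checks exist.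
import Mathlib
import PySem

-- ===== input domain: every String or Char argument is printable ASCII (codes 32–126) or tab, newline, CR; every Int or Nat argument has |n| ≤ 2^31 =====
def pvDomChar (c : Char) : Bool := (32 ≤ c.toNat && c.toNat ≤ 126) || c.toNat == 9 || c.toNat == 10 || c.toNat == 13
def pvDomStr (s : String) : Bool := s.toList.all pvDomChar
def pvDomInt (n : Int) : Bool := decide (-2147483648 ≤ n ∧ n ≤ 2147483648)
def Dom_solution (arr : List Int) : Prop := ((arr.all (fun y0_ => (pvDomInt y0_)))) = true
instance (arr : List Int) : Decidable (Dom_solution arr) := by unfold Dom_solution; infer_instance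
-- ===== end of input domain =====

-- B replaces A's append-under-length-guard while loop by a two-phase algorithm:
-- build a cumulative-weight table (odd = 2, even = 1), then fill each output
-- position from the table with a galloping pointer (objective: alternative).

-- ===== PORT A =====
-- the while loop: state (result, i); `arr[i]` via pyGet? (none = IndexError, unreachable from the initial state)
def solutionLoop (arr : List Int) (result : List Int) (i : Int) : List Int :=
  if _h : result.length < arr.length then
    match PySem.List.pyGet? arr i with
    | none => result
    | some element =>
      if PySem.Int.mod element 2 = 1 ∧ (result ++ [element]).length < arr.length then
        solutionLoop arr (result ++ [element, element]) (i + 1)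
      else
        solutionLoop arr (result ++ [element]) (i + 1)
  else result
termination_by arr.length - result.length
decreasing_by all_goals simp_all [List.length_append]; omega

def solution (arr : List Int) : List Int := solutionLoop arr [] 0

-- ===== PORT B =====
-- phase-1 loop body: append the running cumulative weight to the table
def solutionStep1 (st : List Int × Int) (e : Int) : List Int × Int :=
  let cum := st.2 + (if PySem.Int.mod e 2 = 1 then 2 else 1)
  (st.1 ++ [cum], cum)

-- the inner `while s[i] <= j: i += 1`; the out-of-range branch is Python's
-- IndexError, unreachable here since cumulative weights reach ≥ len(arr) > j
def solutionFind (s : List Int) (j : Int) (i : Nat) : Nat :=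
  if h : i < s.length then
    if s[i] ≤ j then solutionFind s j (i + 1) else i
  else i
termination_by s.length - i

-- phase-2 loop body: locate output position j's source element, append it
-- (`arr[i]` out of range would be Python's IndexError, unreachable)
def solutionStep2 (arr s : List Int) (st : List Int × Nat) (j : Int) : List Int × Nat :=
  let i := solutionFind s j st.2
  (st.1 ++ (match arr[i]? with | some e => [e] | none => []), i)

def solution_alt (arr : List Int) : List Int :=
  let s := (arr.foldl solutionStep1 ([], 0)).1
  ((PySem.List.pyRange 0 (arr.length : Int) 1).foldl (solutionStep2 arr s) ([], 0)).1

-- ===== PRECONDITION & SPEC =====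
def Spec_solution (arr : List Int) (out : List Int) : Prop := out = solution_alt arr
instance (arr : List Int) (out : List Int) : Decidable (Spec_solution arr out) := by unfold Spec_solution; infer_instance

-- ===== CLAIM (what is proved, stated in full; the proofs are below) =====
def Claim_equal_solution : Prop := ∀ (arr : List Int), Dom_solution arr → Spec_solution arr (solution arr)

-- ===== LEMMAS AND PROOFS =====

def pvDup (e : Int) : List Int := if PySem.Int.mod e 2 = 1 then [e, e] else [e]

theorem pvDup_len (e : Int) : 1 ≤ (pvDup e).length := by
  unfold pvDup; split <;> simp

theorem flatMap_len_ge (l : List Int) : l.length ≤ (l.flatMap pvDup).length := by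
  induction l with
  | nil => simp
  | cons e t ih =>
    have := pvDup_len e
    simp only [List.flatMap_cons, List.length_append, List.length_cons]
    omega

theorem flatMap_prefix {l₁ l₂ : List Int} (h : l₁ <+: l₂) :
    l₁.flatMap pvDup <+: l₂.flatMap pvDup := by
  obtain ⟨t, rfl⟩ := h
  exact ⟨t.flatMap pvDup, (List.flatMap_append).symm⟩

-- ---- A-side characterisation: solution arr = (arr.flatMap pvDup).take arr.length ----
theorem loop_eq (arr : List Int) :
    ∀ (k i : Nat), k = arr.length - i → i ≤ arr.length →
    ((arr.take i).flatMap pvDup).length < arr.length →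
    solutionLoop arr ((arr.take i).flatMap pvDup) i = (arr.flatMap pvDup).take arr.length := by
  intro k
  induction k with
  | zero =>
    intro i hk hi hlt
    have hieq : i = arr.length := by omega
    subst hieq
    simp only [List.take_length] at hlt
    have := flatMap_len_ge arr
    omega
  | succ k ih =>
    intro i hk hi hlt
    set R := (arr.take i).flatMap pvDup with hR
    have hilen : i ≤ R.length := by
      have := flatMap_len_ge (arr.take i)
      rw [List.length_take, Nat.min_eq_left hi] at this
      exact this
    have hin : i < arr.length := by omega
    have hget : PySem.List.pyGet? arr (i : Int) = some arr[i] := by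
      simp [PySem.List.pyGet?_natCast, List.getElem?_eq_getElem hin]
    set e := arr[i] with he
    have htake : arr.take (i + 1) = arr.take i ++ [e] := by
      rw [List.take_add_one, List.getElem?_eq_getElem hin]; rfl
    have hFnext : (arr.take (i + 1)).flatMap pvDup = R ++ pvDup e := by
      rw [htake, List.flatMap_append]
      simp only [List.flatMap_cons, List.flatMap_nil, List.append_nil]
      rfl
    have hpref : (arr.take (i + 1)).flatMap pvDup <+: arr.flatMap pvDup :=
      flatMap_prefix (List.take_prefix (i + 1) arr)
    have hfin : ∀ p : List Int, p <+: arr.flatMap pvDup → p.length = arr.length →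
        p = (arr.flatMap pvDup).take arr.length := by
      intro p hp hl
      have := (List.prefix_iff_eq_take).mp hp
      rw [hl] at this; exact this
    rw [solutionLoop]
    rw [dif_pos hlt, hget]
    dsimp only
    by_cases hc : PySem.Int.mod e 2 = 1 ∧ (R ++ [e]).length < arr.length
    · rw [if_pos hc]
      obtain ⟨hodd, hroom⟩ := hc
      have hdup : pvDup e = [e, e] := by unfold pvDup; rw [if_pos hodd]
      have hR2 : R ++ [e, e] = (arr.take (i + 1)).flatMap pvDup := by rw [hFnext, hdup]
      simp only [List.length_append, List.length_cons, List.length_nil] at hroom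
      by_cases hlt2 : (R ++ [e, e]).length < arr.length
      · rw [hR2]
        rw [hR2] at hlt2
        exact ih (i + 1) (by omega) (by omega) hlt2
      · rw [solutionLoop, dif_neg hlt2]
        have hlen2 : (R ++ [e, e]).length = arr.length := by
          simp only [List.length_append, List.length_cons, List.length_nil]
          simp only [List.length_append, List.length_cons, List.length_nil] at hlt2
          omega
        exact hfin _ (hR2 ▸ hpref) hlen2
    · rw [if_neg hc]
      by_cases hodd : PySem.Int.mod e 2 = 1
      · have hfull : (R ++ [e]).length = arr.length := by
          simp only [List.length_append, List.length_cons, List.length_nil]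
          have : ¬ (R ++ [e]).length < arr.length := fun h => hc ⟨hodd, h⟩
          simp only [List.length_append, List.length_cons, List.length_nil] at this
          omega
        rw [solutionLoop, dif_neg (by omega)]
        have hdup : pvDup e = [e, e] := by unfold pvDup; rw [if_pos hodd]
        have hp : R ++ [e] <+: arr.flatMap pvDup := by
          refine List.IsPrefix.trans ?_ hpref
          rw [hFnext, hdup]
          exact ⟨[e], by simp⟩
        exact hfin _ hp hfull
      · have hdup : pvDup e = [e] := by unfold pvDup; rw [if_neg hodd]
        have hR1 : R ++ [e] = (arr.take (i + 1)).flatMap pvDup := by rw [hFnext, hdup]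
        by_cases hlt1 : (R ++ [e]).length < arr.length
        · rw [hR1]
          rw [hR1] at hlt1
          exact ih (i + 1) (by omega) (by omega) hlt1
        · rw [solutionLoop, dif_neg hlt1]
          have hlen1 : (R ++ [e]).length = arr.length := by
            simp only [List.length_append, List.length_cons, List.length_nil] at hlt1 ⊢
            omega
          exact hfin _ (hR1 ▸ hpref) hlen1

theorem solution_eq_take (arr : List Int) :
    solution arr = (arr.flatMap pvDup).take arr.length := by
  unfold solution
  by_cases h0 : arr.length = 0
  · rw [solutionLoop, dif_neg (by omega)]
    simp [h0]
  · have : ([] : List Int) = (arr.take 0).flatMap pvDup := by simp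
    exact loop_eq arr (arr.length - 0) 0 rfl (by omega) (by simp; omega)

-- ---- B-side characterisation ----

-- prefix weight: length of the duplicated prefix
def pvS (arr : List Int) (k : Nat) : Nat := ((arr.take k).flatMap pvDup).length


theorem pvS_ge (arr : List Int) {m : Nat} (h : m ≤ arr.length) : m ≤ pvS arr m := by
  unfold pvS
  have := flatMap_len_ge (arr.take m)
  rw [List.length_take, Nat.min_eq_left h] at this
  exact this

-- phase 1 builds exactly the table of prefix weights
theorem phase1_eq (l : List Int) : ∀ (s0 : List Int) (c0 : Int),
    l.foldl solutionStep1 (s0, c0) =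
      (s0 ++ (List.range l.length).map (fun k => c0 + (pvS l (k + 1) : Int)), c0 + (pvS l l.length : Int)) := by
  induction l with
  | nil => intro s0 c0; simp [pvS]
  | cons e t ih =>
    intro s0 c0
    have hw : (if PySem.Int.mod e 2 = 1 then (2 : Int) else 1) = ((pvDup e).length : Int) := by
      unfold pvDup; split <;> simp
    have hS0 : pvS (e :: t) 1 = (pvDup e).length := by simp [pvS]
    have hSk : ∀ k : Nat, pvS (e :: t) (k + 1 + 1) = (pvDup e).length + pvS t (k + 1) := by
      intro k
      simp only [pvS, List.take_succ_cons, List.flatMap_cons, List.length_append]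
    have hlen : pvS (e :: t) (e :: t).length = (pvDup e).length + pvS t t.length := by
      simp only [pvS, List.length_cons, List.take_succ_cons, List.flatMap_cons, List.length_append]
    simp only [List.foldl_cons, solutionStep1]
    rw [ih]
    refine Prod.ext ?_ ?_
    · simp only
      rw [List.append_assoc]
      congr 1
      rw [List.length_cons, List.range_succ_eq_map, List.map_cons, List.map_map,
        List.singleton_append]
      congr 1
      · rw [hw]
        have h01 : (0 : Nat) + 1 = 1 := rfl
        rw [h01, hS0]
      · apply List.map_congr_left
        intro k _
        simp only [Function.comp_apply]
        rw [hw, hSk k]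
        push_cast
        ring
    · simp only
      rw [hw, hlen]
      push_cast
      ring

-- specification of the galloping pointer
theorem solutionFind_spec (s : List Int) (j : Int) (i : Nat) :
    i ≤ solutionFind s j i ∧
    (i ≤ s.length → solutionFind s j i ≤ s.length) ∧
    (∀ k, i ≤ k → k < solutionFind s j i → ∀ v, s[k]? = some v → v ≤ j) ∧
    (∀ v, s[solutionFind s j i]? = some v → j < v) := by
  induction i using solutionFind.induct s j with
  | case1 x h hle ih =>
    rw [solutionFind, dif_pos h, if_pos hle]
    obtain ⟨ih1, ih2, ih3, ih4⟩ := ih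
    refine ⟨by omega, fun _ => ih2 (by omega), ?_, ih4⟩
    intro k hik hkr v hv
    by_cases hki : k = x
    · subst hki
      rw [List.getElem?_eq_getElem h] at hv
      cases hv
      exact hle
    · exact ih3 k (by omega) hkr v hv
  | case2 x h hle =>
    rw [solutionFind, dif_pos h, if_neg hle]
    refine ⟨le_refl _, fun h' => by omega, fun k h1 h2 => by omega, ?_⟩
    intro v hv
    rw [List.getElem?_eq_getElem h] at hv
    cases hv
    omega
  | case3 x h =>
    rw [solutionFind, dif_neg h]
    refine ⟨le_refl _, fun h' => h', fun k h1 h2 => by omega, ?_⟩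
    intro v hv
    rw [List.getElem?_eq_none_iff.mpr (by omega)] at hv
    cases hv

-- reading one element of the duplicated list
theorem flat_get (l : List Int) : ∀ (i j : Nat), i < l.length →
    pvS l i ≤ j → j < pvS l (i + 1) →
    (l.flatMap pvDup)[j]? = l[i]? := by
  induction l with
  | nil => intro i j h; simp at h
  | cons e t ih =>
    intro i j hi hlo hhi
    match i with
    | 0 =>
      have h1 : pvS (e :: t) 1 = (pvDup e).length := by simp [pvS]
      rw [h1] at hhi
      rw [List.flatMap_cons, List.getElem?_append_left hhi, List.getElem?_cons_zero]
      unfold pvDup at hhi ⊢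
      by_cases hodd : PySem.Int.mod e 2 = 1
      · rw [if_pos hodd] at hhi ⊢
        have h2 : j < 2 := by simpa using hhi
        interval_cases j <;> simp
      · rw [if_neg hodd] at hhi ⊢
        have h2 : j < 1 := by simpa using hhi
        interval_cases j
        simp
    | i + 1 =>
      have hlo' : pvS (e :: t) (i + 1) = (pvDup e).length + pvS t i := by
        simp only [pvS, List.take_succ_cons, List.flatMap_cons, List.length_append]
      have hhi' : pvS (e :: t) (i + 1 + 1) = (pvDup e).length + pvS t (i + 1) := by
        simp only [pvS, List.take_succ_cons, List.flatMap_cons, List.length_append]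
      rw [hlo'] at hlo
      rw [hhi'] at hhi
      have hge : (pvDup e).length ≤ j := by omega
      rw [List.flatMap_cons, List.getElem?_append_right hge, List.getElem?_cons_succ]
      exact ih i (j - (pvDup e).length) (by simpa using hi) (by omega) (by omega)

-- the phase-2 fold, run on the table of prefix weights, produces the truncated duplication
theorem phase2_eq (arr : List Int)
    (s : List Int) (hs : s = (List.range arr.length).map (fun k => (pvS arr (k + 1) : Int))) :
    ∀ m : Nat, m ≤ arr.length →
    ∃ i : Nat, (PySem.List.pyRange 0 (m : Int) 1).foldl (solutionStep2 arr s) ([], 0) =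
        ((arr.flatMap pvDup).take m, i) ∧ i ≤ arr.length ∧ pvS arr i ≤ m := by
  have hslen : s.length = arr.length := by simp [hs]
  have hsget : ∀ k, k < arr.length → s[k]? = some ((pvS arr (k + 1) : Int)) := by
    intro k hk
    subst hs
    rw [List.getElem?_map, List.getElem?_range hk]
    rfl
  intro m
  induction m with
  | zero =>
    intro _
    refine ⟨0, ?_, by omega, by simp [pvS]⟩
    rw [PySem.List.pyRange_one_eq_nil (by omega)]
    simp
  | succ m ih =>
    intro hm1
    obtain ⟨i, heq, hile, hSi⟩ := ih (by omega)
    have hrange : PySem.List.pyRange 0 ((m + 1 : Nat) : Int) 1 =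
        PySem.List.pyRange 0 (m : Int) 1 ++ [(m : Int)] := by
      push_cast
      exact PySem.List.pyRange_one_succ_right (by omega)
    rw [hrange, List.foldl_append, heq]
    simp only [List.foldl_cons, List.foldl_nil, solutionStep2]
    obtain ⟨hir, hrle, hmid, hbig⟩ := solutionFind_spec s (m : Int) i
    generalize hrdef : solutionFind s (m : Int) i = r at hir hrle hmid hbig
    have hrle' : r ≤ arr.length := by rw [← hslen]; exact hrle (by omega)
    have hiltn : i < arr.length := by
      by_contra hc
      have hieq : i = arr.length := by omega
      rw [hieq] at hSi
      have := pvS_ge arr (le_refl arr.length)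
      omega
    have hrlt : r < arr.length := by
      by_contra hc
      have hreq : r = arr.length := by omega
      have hlast := hmid (arr.length - 1) (by omega) (by omega)
        ((pvS arr (arr.length - 1 + 1) : Int)) (hsget _ (by omega))
      have h2 : arr.length - 1 + 1 = arr.length := by omega
      rw [h2] at hlast
      have h3 := pvS_ge arr (le_refl arr.length)
      omega
    have hSr : pvS arr r ≤ m := by
      by_cases hri : r = i
      · subst hri; exact hSi
      · have hlast := hmid (r - 1) (by omega) (by omega)
          ((pvS arr (r - 1 + 1) : Int)) (hsget _ (by omega))
        have h2 : r - 1 + 1 = r := by omega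
        rw [h2] at hlast
        omega
    have hSr1 : m < pvS arr (r + 1) := by
      have := hbig ((pvS arr (r + 1) : Int)) (hsget r hrlt)
      omega
    have hget := flat_get arr r m hrlt hSr hSr1
    have harr : arr[r]? = some (arr[r]'hrlt) := List.getElem?_eq_getElem hrlt
    rw [harr] at hget
    rw [harr]
    refine ⟨r, ?_, hrle', by omega⟩
    refine Prod.ext ?_ rfl
    simp only
    rw [List.take_add_one, hget]
    rfl

theorem solution_alt_eq_take (arr : List Int) :
    solution_alt arr = (arr.flatMap pvDup).take arr.length := by
  unfold solution_alt
  have h1 := phase1_eq arr [] 0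
  simp only [List.nil_append] at h1
  rw [h1]
  simp only
  have hs : (List.range arr.length).map (fun k => (0 : Int) + (pvS arr (k + 1) : Int)) =
      (List.range arr.length).map (fun k => (pvS arr (k + 1) : Int)) := by
    apply List.map_congr_left; intro k _; ring
  rw [hs]
  obtain ⟨i, heq, _, _⟩ := phase2_eq arr _ rfl arr.length (le_refl _)
  rw [heq]

-- ===== VERDICT (by name: the statement is the Claim_ definition above) =====
theorem solution_spec : Claim_equal_solution := by
  intro arr _
  unfold Spec_solution
  rw [solution_eq_take, solution_alt_eq_take]
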